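-- pv_equiv track=rewrite | github.com/d-koding/Classwork-Showcase | image_manipulation/ppm_modify.py | col_scaler
-- ===== SOURCE A (Python) =====
-- def col_scaler(rows, scale):
--     """
--     Takes a list of lists and scales each list within the list based on a scaling factor
--     :param rows: (list) a list of lists of rgb values
--     :param scale: (int) a scaling factor
--     :return: (list) a new list of altered lists
--     """
--     # initializes a variable to represent an empty list of rows
--     new_rows = []
--
--     # if statement to account for 0 being entered, returns nothing
--     if scale == 0:
--         return new_rows
--
--     # if statement to account for scaling factor being larger than number triplets in one row
--     if scale >= (len(rows[0]) / 3):
--         return rows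
--
--     # for loop that runs through each list within the row list
--     for row in rows:
--
--         # initializes variable to count number of groups of three in list
--         count = 0
--
--         # initializes variable to represent an empty list
--         new_row = []
--
--         # for loop that runs on every third element in list
--         for i in range(0, len(row), 3):
--
--             # if statement that runs when indexed element is evenly divisible by scaling factor and within range
--             if count % scale == 0 and count * 3 < len(row) - 3:
--
--                 # appends element as well as the next two to a new list
--                 new_row.append(row[i])
--                 new_row.append(row[i + 1])
--                 new_row.append(row[i + 2])
--
--             # updates every third element count
--             count += 1
--
--         # appends newly created list to list of rows
--         new_rows.append(new_row)
--
--     # returns the new list of rows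
--     return new_rows
-- ===== SOURCE B (Python) =====
-- def col_scaler(rows, scale):
--     """
--     Takes a list of lists and scales each list within the list based on a scaling factor
--     :param rows: (list) a list of lists of rgb values
--     :param scale: (int) a scaling factor
--     :return: (list) a new list of altered lists
--     """
--     if scale == 0:
--         return []
--     if scale >= len(rows[0]) / 3:
--         return rows
--     new_rows = []
--     for row in rows:
--         # materialize the row as triplets, drop the last (always-excluded) group,
--         # keep every group whose index is divisible by scale, and flatten
--         triplets = [row[i:i + 3] for i in range(0, len(row), 3)]
--         kept = [t for j, t in enumerate(triplets[:-1]) if j % scale == 0]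
--         new_rows.append([v for t in kept for v in t])
--     return new_rows
-- ===== Notes on version B (the rewrite author's own statement) =====
-- stated objective: simpler
-- what changed: B materializes each row as explicit 3-element groups, slices off the always-dropped last group and keeps every scale-divisible group index, replacing A's flat index scan with a running counter, modulo test and three element-by-element appends.
import Mathlib
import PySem

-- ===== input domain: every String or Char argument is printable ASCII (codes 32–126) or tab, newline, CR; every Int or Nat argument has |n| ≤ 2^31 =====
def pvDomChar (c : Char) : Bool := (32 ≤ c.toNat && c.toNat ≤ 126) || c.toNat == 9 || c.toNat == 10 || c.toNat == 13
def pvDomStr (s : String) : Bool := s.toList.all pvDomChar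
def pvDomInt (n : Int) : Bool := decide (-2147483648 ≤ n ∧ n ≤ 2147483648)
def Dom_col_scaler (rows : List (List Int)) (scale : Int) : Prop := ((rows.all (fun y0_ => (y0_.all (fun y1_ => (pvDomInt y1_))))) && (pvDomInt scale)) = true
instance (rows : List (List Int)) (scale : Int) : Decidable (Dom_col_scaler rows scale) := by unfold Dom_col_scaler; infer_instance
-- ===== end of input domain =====

-- B regroups each row into explicit triplets, slices off the always-dropped last group and filters by
-- triplet index, instead of A's flat index scan with a counter; objective: simpler, same return values.

-- ===== PORT A =====
-- counter/modulo scan over every third flat index, appending three elements at a time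
def col_scaler (rows : List (List Int)) (scale : Int) : List (List Int) :=
  if scale = 0 then []
  -- Python 'scale >= len(rows[0]) / 3' uses true division; over integers it is exactly 'len ≤ 3*scale'
  else if ((((PySem.List.pyGet? rows 0).getD []).length : Int)) ≤ 3 * scale then rows
  else
    rows.foldl (fun new_rows row =>
      new_rows ++ [ ((PySem.List.pyRange 0 (row.length : Int) 3).foldl
        (fun (st : Int × List Int) i =>
          if PySem.Int.mod st.1 scale = 0 ∧ st.1 * 3 < (row.length : Int) - 3 then
            (st.1 + 1, st.2 ++ [PySem.List.pyGetD row i 0,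
                                PySem.List.pyGetD row (i + 1) 0,
                                PySem.List.pyGetD row (i + 2) 0])
          else (st.1 + 1, st.2)) ((0 : Int), ([] : List Int))).2 ]) []

-- ===== PORT B =====
-- group the row into triplets, drop the last group, keep every scale-divisible index, flatten
def col_scaler_alt (rows : List (List Int)) (scale : Int) : List (List Int) :=
  if scale = 0 then []
  -- same guard as A: 'scale >= len(rows[0]) / 3' over integers is exactly 'len ≤ 3*scale'
  else if ((((PySem.List.pyGet? rows 0).getD []).length : Int)) ≤ 3 * scale then rows
  else
    rows.foldl (fun new_rows row =>
      let triplets := (PySem.List.pyRange 0 (row.length : Int) 3).map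
        (fun i => PySem.List.slice row (some i) (some (i + 3)))
      let kept := ((PySem.List.enumerate (PySem.List.slice triplets none (some (-1)))).filter
        (fun jt => PySem.Int.mod jt.1 scale == 0)).map (·.2)
      new_rows ++ [kept.flatten]) []

-- ===== PRECONDITION & SPEC =====
-- Pre_ excludes exactly the inputs where A raises: rows == [] with scale != 0 hits len(rows[0]) → IndexError
def Pre_col_scaler (rows : List (List Int)) (scale : Int) : Prop := scale = 0 ∨ rows ≠ []
instance (rows : List (List Int)) (scale : Int) : Decidable (Pre_col_scaler rows scale) := by
  unfold Pre_col_scaler; infer_instance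
def pvWitness_col_scaler : List (List Int) × Int := ([[1, 2, 3, 4, 5, 6, 7, 8, 9, 10, 11, 12]], 2)

def Spec_col_scaler (rows : List (List Int)) (scale : Int) (out : List (List Int)) : Prop := out = col_scaler_alt rows scale
instance (rows : List (List Int)) (scale : Int) (out : List (List Int)) : Decidable (Spec_col_scaler rows scale out) := by unfold Spec_col_scaler; infer_instance

-- ===== CLAIM (what is proved, stated in full; the proofs are below) =====
def Claim_equal_col_scaler : Prop := ∀ (rows : List (List Int)) (scale : Int), Dom_col_scaler rows scale → Pre_col_scaler rows scale → Spec_col_scaler rows scale (col_scaler rows scale)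

-- ===== LEMMAS AND PROOFS =====

theorem range3 (n : Nat) : PySem.List.pyRange 0 (n:Int) 3 = (List.range ((n+2)/3)).map (fun k : Nat => 3*(k:Int)) := by
  rw [PySem.List.pyRange_of_pos _ _ (by norm_num)]
  have : (if (0:Int) < (n:Int) then (((n:Int) - 0 + 3 - 1)/3).toNat else 0) = (n+2)/3 := by
    split_ifs with h
    · omega
    · omega
  rw [this]
  simp only [zero_add]

theorem take3 (l : List Int) (h : 3 ≤ l.length) : l.take 3 = [l.getD 0 0, l.getD 1 0, l.getD 2 0] := by
  match l with
  | a :: b :: c :: rest => rfl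
  | [] => simp at h
  | [a] => simp at h
  | [a, b] => simp at h

theorem dropLast_map_range {α : Type} (g : Nat → α) (t : Nat) :
    ((List.range t).map g).dropLast = (List.range (t-1)).map g := by
  cases t with
  | zero => simp
  | succ m => simp [List.range_succ]

theorem enumFF (scale : Int) (xs : List (List Int)) : ∀ (s : Int),
    ((((PySem.List.enumerate xs s).filter (fun jt => PySem.Int.mod jt.1 scale == 0)).map (·.2)).flatten)
    = ((List.range xs.length).map
        (fun k : Nat => if PySem.Int.mod (s + (k:Int)) scale = 0 then xs.getD k [] else [])).flatten := by
  induction xs with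
  | nil => intro s; simp [PySem.List.enumerate]
  | cons x rest ih =>
    intro s
    rw [PySem.List.enumerate_cons]
    rw [List.length_cons, List.range_succ_eq_map]
    simp only [List.map_cons, List.map_map, List.filter_cons, List.flatten_cons]
    have hmap : (List.range rest.length).map
        ((fun k : Nat => if PySem.Int.mod (s + (k:Int)) scale = 0 then (x :: rest).getD k [] else []) ∘ Nat.succ)
        = (List.range rest.length).map
          (fun k : Nat => if PySem.Int.mod ((s+1) + (k:Int)) scale = 0 then rest.getD k [] else []) := by
      apply List.map_congr_left
      intro k _
      simp only [Function.comp]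
      have : s + ((k:Nat).succ : Int) = (s+1) + (k:Int) := by push_cast; ring
      rw [this]
      rfl
    rw [hmap, ← ih (s+1)]
    by_cases h : PySem.Int.mod s scale = 0
    · simp [h]
    · simp [h]

theorem A_fold (row : List Int) (scale : Int) : ∀ (t : Nat),
    ((List.range t).map (fun k : Nat => 3*(k:Int))).foldl
      (fun (st : Int × List Int) i =>
        if PySem.Int.mod st.1 scale = 0 ∧ st.1 * 3 < (row.length : Int) - 3 then
          (st.1 + 1, st.2 ++ [PySem.List.pyGetD row i 0,
                              PySem.List.pyGetD row (i + 1) 0,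
                              PySem.List.pyGetD row (i + 2) 0])
        else (st.1 + 1, st.2)) ((0 : Int), ([] : List Int))
    = ((t : Int), ((List.range t).map
        (fun k : Nat => if PySem.Int.mod (k:Int) scale = 0 ∧ (k:Int) * 3 < (row.length : Int) - 3 then
          [row.getD (3*k) 0, row.getD (3*k+1) 0, row.getD (3*k+2) 0] else [])).flatten) := by
  intro t
  induction t with
  | zero => simp
  | succ m ih =>
    rw [List.range_succ, List.map_append, List.map_append, List.foldl_append, ih]
    simp only [List.map_cons, List.map_nil, List.foldl_cons, List.foldl_nil,
      List.flatten_append, List.flatten_cons, List.flatten_nil]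
    have h1 : 3 * (m:Int) = ((3*m : Nat) : Int) := by push_cast; ring
    by_cases h : PySem.Int.mod (m:Int) scale = 0 ∧ (m:Int) * 3 < (row.length : Int) - 3
    · simp only [if_pos h]
      rw [h1]
      have h2' : ((3*m : Nat) : Int) + 1 = ((3*m+1 : Nat) : Int) := by push_cast; ring
      have h3' : ((3*m : Nat) : Int) + 2 = ((3*m+2 : Nat) : Int) := by push_cast; ring
      simp only [Prod.mk.injEq]
      refine ⟨by push_cast; ring, ?_⟩
      rw [h2', h3']
      simp only [PySem.List.pyGetD_natCast, List.append_nil]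
    · simp only [if_neg h]
      simp

theorem drop_take3 (row : List Int) (m : Nat) (h : m + 3 ≤ row.length) :
    (row.drop m).take 3 = [row.getD m 0, row.getD (m+1) 0, row.getD (m+2) 0] := by
  rw [take3 (row.drop m) (by simp; omega)]
  simp only [List.getD_eq_getElem?_getD, List.getElem?_drop]
  simp

theorem inner_eq (row : List Int) (scale : Int) :
    ((PySem.List.pyRange 0 (row.length : Int) 3).foldl
      (fun (st : Int × List Int) i =>
        if PySem.Int.mod st.1 scale = 0 ∧ st.1 * 3 < (row.length : Int) - 3 then
          (st.1 + 1, st.2 ++ [PySem.List.pyGetD row i 0,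
                              PySem.List.pyGetD row (i + 1) 0,
                              PySem.List.pyGetD row (i + 2) 0])
        else (st.1 + 1, st.2)) ((0 : Int), ([] : List Int))).2
    = (((PySem.List.enumerate (PySem.List.slice
            ((PySem.List.pyRange 0 (row.length : Int) 3).map
              (fun i => PySem.List.slice row (some i) (some (i + 3)))) none (some (-1)))).filter
          (fun jt => PySem.Int.mod jt.1 scale == 0)).map (·.2)).flatten := by
  rw [range3 row.length]
  rw [A_fold row scale ((row.length+2)/3)]
  have htrip : ((List.range ((row.length+2)/3)).map (fun k : Nat => 3*(k:Int))).map
      (fun i => PySem.List.slice row (some i) (some (i + 3)))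
      = (List.range ((row.length+2)/3)).map (fun k : Nat => (row.drop (3*k)).take 3) := by
    rw [List.map_map]
    apply List.map_congr_left
    intro k _
    simp only [Function.comp]
    have e1 : 3*(k:Int) = ((3*k : Nat) : Int) := by push_cast; ring
    have e2 : (3:Int) = ((3:Nat) : Int) := by norm_num
    rw [e1]
    conv_lhs => rw [e2]
    rw [PySem.List.slice_natCast_add]
  rw [htrip, PySem.List.slice_to_neg_one, dropLast_map_range, enumFF]
  simp only [List.length_map, List.length_range]
  by_cases h0 : (row.length + 2)/3 = 0
  · simp [h0]
  · obtain ⟨m, hm⟩ : ∃ m, (row.length + 2)/3 = m + 1 := ⟨(row.length + 2)/3 - 1, by omega⟩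
    rw [hm]
    simp only [Nat.add_sub_cancel]
    rw [List.range_succ, List.map_append, List.flatten_append]
    have hlast : ¬ (PySem.Int.mod ((m : Nat) : Int) scale = 0 ∧ ((m : Nat) : Int) * 3 < (row.length : Int) - 3) := by
      rintro ⟨-, hc⟩
      have hub : 3 * (m + 1) ≤ row.length + 2 := by omega
      omega
    simp only [List.map_cons, List.map_nil, List.flatten_cons, List.flatten_nil,
      if_neg hlast, List.append_nil]
    congr 1
    apply List.map_congr_left
    intro k hk
    rw [List.mem_range] at hk
    have hkn : 3*k + 4 <= row.length := by omega
    have hcond : ((k:Int) * 3 < (row.length:Int) - 3) := by omega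
    have hg : ((List.range m).map (fun k : Nat => (row.drop (3*k)).take 3)).getD k []
        = (row.drop (3*k)).take 3 := by
      rw [List.getD_eq_getElem?_getD, List.getElem?_map]
      simp [List.getElem?_range hk]
    rw [zero_add, hg, drop_take3 row (3*k) (by omega)]
    by_cases hmod : PySem.Int.mod (k:Int) scale = 0
    · simp [hmod, hcond]
    · simp [hmod]

-- ===== VERDICT (by name: the statement is the Claim_ definition above) =====
theorem col_scaler_spec : Claim_equal_col_scaler := by
  intro rows scale _ _
  unfold Spec_col_scaler col_scaler col_scaler_alt
  split_ifs with h1 h2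
  · rfl
  · rfl
  · have hfun : (fun (new_rows : List (List Int)) (row : List Int) =>
        new_rows ++ [ ((PySem.List.pyRange 0 (row.length : Int) 3).foldl
          (fun (st : Int × List Int) i =>
            if PySem.Int.mod st.1 scale = 0 ∧ st.1 * 3 < (row.length : Int) - 3 then
              (st.1 + 1, st.2 ++ [PySem.List.pyGetD row i 0,
                                  PySem.List.pyGetD row (i + 1) 0,
                                  PySem.List.pyGetD row (i + 2) 0])
            else (st.1 + 1, st.2)) ((0 : Int), ([] : List Int))).2 ])
      = (fun (new_rows : List (List Int)) (row : List Int) =>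
        let triplets := (PySem.List.pyRange 0 (row.length : Int) 3).map
          (fun i => PySem.List.slice row (some i) (some (i + 3)))
        let kept := ((PySem.List.enumerate (PySem.List.slice triplets none (some (-1)))).filter
          (fun jt => PySem.Int.mod jt.1 scale == 0)).map (·.2)
        new_rows ++ [kept.flatten]) := by
      funext new_rows row
      show _ = new_rows ++ [_]
      rw [inner_eq row scale]
    rw [hfun]
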